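-- pv_equiv track=rewrite | github.com/VineetPrasadVerma/GeeksForGeeks | Recursion/substringwithsamefirstandlast.py | substring
-- ===== SOURCE A (Python) =====
-- def substring(s):
--     ans = []
--     if s == "":
--         return ans
--     for i in range(len(s)):
--         temp = s[:i+1]
--         if temp[0] == temp[-1]:
--             ans.append(temp)
--     return ans + substring(s[1:])
-- ===== SOURCE B (Python) =====
-- def substring(s):
--     ans = []
--     for i in range(len(s)):
--         for j in range(i, len(s)):
--             if s[i] == s[j]:
--                 ans.append(s[i:j+1])
--     return ans
-- ===== Notes on version B (the rewrite author's own statement) =====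
-- stated objective: simpler
-- what changed: Replaces the recursion over suffixes (which re-slices the whole string and re-scans prefixes at every level) with a single non-recursive pair of nested index loops appending s[i:j+1] whenever s[i]==s[j].
import Mathlib
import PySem

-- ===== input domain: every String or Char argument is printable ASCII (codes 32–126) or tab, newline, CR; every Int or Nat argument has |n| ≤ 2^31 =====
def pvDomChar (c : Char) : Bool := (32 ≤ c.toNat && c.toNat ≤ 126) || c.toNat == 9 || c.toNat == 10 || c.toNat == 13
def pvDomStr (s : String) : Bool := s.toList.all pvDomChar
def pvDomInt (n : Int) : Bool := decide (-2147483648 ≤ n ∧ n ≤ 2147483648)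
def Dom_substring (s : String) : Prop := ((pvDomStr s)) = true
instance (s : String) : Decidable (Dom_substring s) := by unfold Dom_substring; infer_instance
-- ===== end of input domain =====

-- B replaces A's recursion over suffixes (which re-slices the string at every level) by a single
-- non-recursive pair of nested index loops; same return value, simpler control flow.

-- ===== PORT A =====
-- literal transliteration of A: collect prefixes s[:i+1] with temp[0]==temp[-1], then recurse on s[1:]
def substring (s : String) : List String :=
  if _h : s = "" then []
  else
    ((PySem.List.pyRange 0 (PySem.Str.len s) 1).foldl
      (fun ans i =>
        let temp := PySem.Str.slice s none (some (i + 1))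
        if PySem.Str.pyGet? temp 0 = PySem.Str.pyGet? temp (-1) then ans ++ [temp] else ans)
      [])
    ++ substring (PySem.Str.slice s (some 1) none)
termination_by s.toList.length
decreasing_by
  have hne : s.toList ≠ [] := by simpa [String.toList_eq_nil_iff] using _h
  have hpos : 0 < s.toList.length := List.length_pos_of_ne_nil hne
  simp only [PySem.Str.toList_slice, PySem.Chars.slice_eq_listSlice, PySem.List.slice_from_one,
    List.length_tail]
  omega

-- ===== PORT B =====
-- literal transliteration of B: for i in range(len(s)): for j in range(i, len(s)): if s[i]==s[j]: ans.append(s[i:j+1])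
def substring_alt (s : String) : List String :=
  (PySem.List.pyRange 0 (PySem.Str.len s) 1).foldl
    (fun ans i =>
      (PySem.List.pyRange i (PySem.Str.len s) 1).foldl
        (fun ans j =>
          if PySem.Str.pyGet? s i = PySem.Str.pyGet? s j then
            ans ++ [PySem.Str.slice s (some i) (some (j + 1))]
          else ans)
        ans)
    []

-- ===== PRECONDITION & SPEC =====
def Spec_substring (s : String) (out : List String) : Prop := out = substring_alt s
instance (s : String) (out : List String) : Decidable (Spec_substring s out) := by unfold Spec_substring; infer_instance

-- ===== CLAIM (what is proved, stated in full; the proofs are below) =====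
def Claim_equal_substring : Prop := ∀ (s : String), Dom_substring s → Spec_substring s (substring s)

-- ===== LEMMAS AND PROOFS =====

-- the substrings of l starting at index i whose first and last characters agree, in order of length
def pvInner (l : List Char) (i : Nat) : List String :=
  ((List.range (l.length - i)).filter (fun k => decide (l[i]? = l[i + k]?))).map
    (fun k => String.ofList ((l.drop i).take (k + 1)))

-- A's result, characterised structurally over the suffixes
def pvF : List Char → List String
  | [] => []
  | c :: t => pvInner (c :: t) 0 ++ pvF t

lemma pv_foldl_if {β α : Type} (P : β → Prop) [DecidablePred P] (f : β → α) :
    ∀ (l : List β) (acc : List α),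
      l.foldl (fun a j => if P j then a ++ [f j] else a) acc
        = acc ++ (l.filter (fun j => decide (P j))).map f := by
  intro l
  induction l with
  | nil => simp
  | cons x xs ih =>
    intro acc
    by_cases hx : P x <;> simp [List.foldl_cons, hx, ih]

lemma pv_foldl_flat {β γ : Type} (F : List γ → β → List γ) (G : β → List γ)
    (h : ∀ acc b, F acc b = acc ++ G b) :
    ∀ (l : List β) (acc : List γ), l.foldl F acc = acc ++ l.flatMap G := by
  intro l
  induction l with
  | nil => simp
  | cons x xs ih =>
    intro acc
    simp [List.foldl_cons, h, ih, List.append_assoc]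

lemma pv_getLast?_take (l : List Char) (k : Nat) (h : k < l.length) :
    (l.take (k + 1)).getLast? = l[k]? := by
  rw [List.getLast?_eq_getElem?]
  have hlen : (l.take (k + 1)).length = k + 1 := by
    simp [List.length_take]; omega
  rw [hlen]
  simp

lemma pv_slice_to (s : String) (k : Nat) :
    (PySem.Str.slice s none (some ((k : Int) + 1))).toList = s.toList.take (k + 1) := by
  have hcast : ((k : Int) + 1) = ((k + 1 : Nat) : Int) := by push_cast; ring
  rw [hcast, PySem.Str.toList_slice, PySem.Chars.slice_eq_listSlice,
    PySem.List.slice_to_natCast]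

lemma pv_flatMap_congr {β γ : Type} {f g : β → List γ} :
    ∀ (l : List β), (∀ a ∈ l, f a = g a) → l.flatMap f = l.flatMap g := by
  intro l
  induction l with
  | nil => intro _; rfl
  | cons x xs ih =>
    intro h
    simp only [List.flatMap_cons, h x (List.mem_cons_self), ih (fun a ha => h a (List.mem_cons_of_mem _ ha))]

set_option maxHeartbeats 1000000 in
lemma pv_A_eq (s : String) : substring s = pvF s.toList := by
  induction s using substring.induct with
  | case1 =>
    rw [substring]
    simp [pvF]
  | case2 s h ih =>
    rw [substring]
    simp only [h, dif_neg, not_false_iff]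
    have hne : s.toList ≠ [] := by simpa [String.toList_eq_nil_iff] using h
    obtain ⟨c, t, hct⟩ := List.exists_cons_of_ne_nil hne
    have htail : (PySem.Str.slice s (some 1) none).toList = t := by
      simp [PySem.List.slice_from_one, hct]
    have hloop :
        ((PySem.List.pyRange 0 (PySem.Str.len s) 1).foldl
          (fun ans i =>
            let temp := PySem.Str.slice s none (some (i + 1))
            if PySem.Str.pyGet? temp 0 = PySem.Str.pyGet? temp (-1) then ans ++ [temp] else ans)
          []) = pvInner s.toList 0 := by
      show ((PySem.List.pyRange 0 (PySem.Str.len s) 1).foldl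
          (fun ans i =>
            if PySem.Str.pyGet? (PySem.Str.slice s none (some (i + 1))) 0
                = PySem.Str.pyGet? (PySem.Str.slice s none (some (i + 1))) (-1) then
              ans ++ [PySem.Str.slice s none (some (i + 1))] else ans)
          []) = pvInner s.toList 0
      rw [pv_foldl_if (fun i : Int => PySem.Str.pyGet? (PySem.Str.slice s none (some (i + 1))) 0
            = PySem.Str.pyGet? (PySem.Str.slice s none (some (i + 1))) (-1))
          (fun i : Int => PySem.Str.slice s none (some (i + 1)))]
      have hlen : PySem.Str.len s = (s.toList.length : Int) := by simp
      rw [hlen, PySem.List.pyRange_zero_natCast, List.filter_map, List.map_map]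
      unfold pvInner
      simp only [Nat.sub_zero, List.drop_zero, List.nil_append, Nat.zero_add]
      have hfil : (List.range s.toList.length).filter
            ((fun i : Int => decide (PySem.Str.pyGet? (PySem.Str.slice s none (some (i + 1))) 0
              = PySem.Str.pyGet? (PySem.Str.slice s none (some (i + 1))) (-1))) ∘ (fun k : Nat => (k : Int)))
          = (List.range s.toList.length).filter (fun k => decide (s.toList[0]? = s.toList[k]?)) := by
        apply List.filter_congr
        intro k hk
        have hk' : k < s.toList.length := List.mem_range.mp hk
        simp only [Function.comp]
        have h0 : PySem.Str.pyGet? (PySem.Str.slice s none (some ((k : Int) + 1))) 0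
            = s.toList[0]? := by
          rw [PySem.Str.pyGet?_eq, PySem.Chars.pyGet?_eq_listPyGet?, pv_slice_to,
            PySem.List.pyGet?_zero, List.getElem?_take]
          simp
        have h1 : PySem.Str.pyGet? (PySem.Str.slice s none (some ((k : Int) + 1))) (-1)
            = s.toList[k]? := by
          rw [PySem.Str.pyGet?_eq, PySem.Chars.pyGet?_eq_listPyGet?, pv_slice_to,
            PySem.List.pyGet?_neg_one, pv_getLast?_take _ _ hk']
        rw [h0, h1]
      rw [hfil]
      apply List.map_congr_left
      intro k hk
      have hk' : k ∈ List.range s.toList.length := List.mem_filter.mp hk |>.1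
      simp only [Function.comp]
      rw [← String.ofList_toList (s := PySem.Str.slice s none (some ((k : Int) + 1))), pv_slice_to]
    rw [hloop, ih, htail, hct, pvF]

lemma pv_B_eq (s : String) :
    substring_alt s = (List.range s.toList.length).flatMap (pvInner s.toList) := by
  unfold substring_alt
  rw [pv_foldl_flat _
      (fun i : Int => ((PySem.List.pyRange i (PySem.Str.len s) 1).filter
          (fun j => decide (PySem.Str.pyGet? s i = PySem.Str.pyGet? s j))).map
        (fun j => PySem.Str.slice s (some i) (some (j + 1))))
      (fun acc i => pv_foldl_if (fun j : Int => PySem.Str.pyGet? s i = PySem.Str.pyGet? s j)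
        (fun j : Int => PySem.Str.slice s (some i) (some (j + 1))) _ acc)]
  have hlen : PySem.Str.len s = (s.toList.length : Int) := by simp
  rw [hlen, PySem.List.pyRange_zero_natCast, List.flatMap_map, List.nil_append]
  apply pv_flatMap_congr
  intro i hi
  have hi' : i < s.toList.length := List.mem_range.mp hi
  rw [PySem.List.pyRange_one]
  have hnat : (((s.toList.length : Int)) - (i : Int)).toNat = s.toList.length - i := by omega
  rw [hnat, List.filter_map, List.map_map]
  unfold pvInner
  have hfil : (List.range (s.toList.length - i)).filter
        ((fun j : Int => decide (PySem.Str.pyGet? s (i : Int) = PySem.Str.pyGet? s j))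
          ∘ (fun k : Nat => (i : Int) + (k : Int)))
      = (List.range (s.toList.length - i)).filter
        (fun k => decide (s.toList[i]? = s.toList[i + k]?)) := by
    apply List.filter_congr
    intro k _
    simp only [Function.comp]
    have hcast : ((i : Int) + (k : Int)) = ((i + k : Nat) : Int) := by push_cast; ring
    simp only [hcast, PySem.Str.pyGet?_natCast]
  rw [hfil]
  apply List.map_congr_left
  intro k _
  simp only [Function.comp]
  have hcast : ((i : Int) + (k : Int) + 1) = ((i + k + 1 : Nat) : Int) := by push_cast; ring
  rw [← String.ofList_toList
      (s := PySem.Str.slice s (some (i : Int)) (some ((i : Int) + (k : Int) + 1))),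
    PySem.Str.toList_slice, PySem.Chars.slice_eq_listSlice, hcast,
    PySem.List.slice_natCast]
  congr 2
  omega

lemma pv_inner_cons (c : Char) (t : List Char) (i : Nat) :
    pvInner (c :: t) (i + 1) = pvInner t i := by
  unfold pvInner
  have hlen : (c :: t).length - (i + 1) = t.length - i := by simp
  rw [hlen]
  have hfil : (List.range (t.length - i)).filter
        (fun k => decide ((c :: t)[i + 1]? = (c :: t)[i + 1 + k]?))
      = (List.range (t.length - i)).filter (fun k => decide (t[i]? = t[i + k]?)) := by
    apply List.filter_congr
    intro k _
    have : i + 1 + k = (i + k) + 1 := by omega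
    rw [this]
    simp [List.getElem?_cons_succ]
  rw [hfil]
  apply List.map_congr_left
  intro k _
  simp [List.drop_succ_cons]

lemma pv_F_eq (l : List Char) : pvF l = (List.range l.length).flatMap (pvInner l) := by
  induction l with
  | nil => rfl
  | cons c t ih =>
    rw [pvF, ih, List.length_cons, List.range_succ_eq_map, List.flatMap_cons, List.flatMap_map]
    congr 1
    apply pv_flatMap_congr
    intro i _
    exact (pv_inner_cons c t i).symm

-- ===== VERDICT (by name: the statement is the Claim_ definition above) =====
theorem substring_spec : Claim_equal_substring := by
  intro s _
  unfold Spec_substring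
  rw [pv_A_eq, pv_B_eq, pv_F_eq]
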